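-- pv_equiv track=rewrite | github.com/hankhsu1996/blackjack-basic-strategy | src/blackjack/evaluator.py | _add_card_to_state
-- ===== SOURCE A (Python) =====
-- def _add_card_to_state(
--     total: int, soft_aces: int, card: int
-- ) -> tuple[int, int]:
--     """Add a card to a (total, soft_aces) state."""
--     if card == 11:  # Ace
--         new_total = total + 11
--         new_soft = soft_aces + 1
--     else:
--         new_total = total + card
--         new_soft = soft_aces
--
--     # Convert soft aces to hard if bust
--     while new_total > 21 and new_soft > 0:
--         new_total -= 10
--         new_soft -= 1
--
--     return new_total, new_soft
-- ===== SOURCE B (Python) =====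
-- def _add_card_to_state(
--     total: int, soft_aces: int, card: int
-- ) -> tuple[int, int]:
--     """Add a card to a (total, soft_aces) state (branch-free dispatch, closed-form bust adjustment)."""
--     # An ace is passed as 11, so the total always grows by the card value;
--     # only the soft-ace count needs the ace test.
--     new_total = total + card
--     new_soft = soft_aces + (card == 11)
--
--     # Downgrade just enough soft aces in one arithmetic step:
--     # k = ceil((new_total - 21) / 10), capped by the aces available.
--     if new_total > 21 and new_soft > 0:
--         k = min(new_soft, -(-(new_total - 21) // 10))
--         new_total -= 10 * k
--         new_soft -= k
--
--     return new_total, new_soft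
-- ===== Notes on version B (the rewrite author's own statement) =====
-- stated objective: faster
-- what changed: Replaces the soft-ace downgrade while-loop with a closed-form ceiling-division of the number of aces to downgrade (k = min(soft, ceil((total-21)/10))) applied in one arithmetic step, and makes the ace dispatch branch-free (total always grows by the card value).
import Mathlib
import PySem

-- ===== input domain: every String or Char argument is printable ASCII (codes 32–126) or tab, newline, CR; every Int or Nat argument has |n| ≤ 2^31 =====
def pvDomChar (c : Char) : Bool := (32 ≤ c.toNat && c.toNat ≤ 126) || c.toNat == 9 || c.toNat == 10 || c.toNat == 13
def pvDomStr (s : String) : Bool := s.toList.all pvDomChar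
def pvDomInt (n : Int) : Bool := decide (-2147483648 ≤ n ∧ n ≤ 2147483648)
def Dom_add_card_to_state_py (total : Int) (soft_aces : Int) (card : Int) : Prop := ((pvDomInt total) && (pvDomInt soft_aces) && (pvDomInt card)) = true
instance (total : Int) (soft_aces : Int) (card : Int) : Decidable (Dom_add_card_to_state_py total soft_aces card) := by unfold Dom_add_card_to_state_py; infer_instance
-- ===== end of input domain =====

-- B replaces A's soft-ace downgrade while-loop with a single closed-form ceiling-division step (constant-time).


-- ===== PORT A =====
-- the 'while new_total > 21 and new_soft > 0' loop of A, step for step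
def pvBustLoop (t s : Int) : Int × Int :=
  if t > 21 ∧ s > 0 then pvBustLoop (t - 10) (s - 1) else (t, s)
termination_by s.toNat
decreasing_by omega

def add_card_to_state_py (total : Int) (soft_aces : Int) (card : Int) : Int × Int :=
  let new_total := if card = 11 then total + 11 else total + card
  let new_soft := if card = 11 then soft_aces + 1 else soft_aces
  pvBustLoop new_total new_soft

-- ===== PORT B =====
def add_card_to_state_py_alt (total : Int) (soft_aces : Int) (card : Int) : Int × Int :=
  let new_total := total + card
  let new_soft := soft_aces + (if card = 11 then 1 else 0)
  if new_total > 21 ∧ new_soft > 0 then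
    let k := min new_soft (-(PySem.Int.floordiv (-(new_total - 21)) 10))
    (new_total - 10 * k, new_soft - k)
  else (new_total, new_soft)

-- ===== PRECONDITION & SPEC =====
def Spec_add_card_to_state_py (total : Int) (soft_aces : Int) (card : Int) (out : Int × Int) : Prop := out = add_card_to_state_py_alt total soft_aces card
instance (total : Int) (soft_aces : Int) (card : Int) (out : Int × Int) : Decidable (Spec_add_card_to_state_py total soft_aces card out) := by unfold Spec_add_card_to_state_py; infer_instance

-- ===== CLAIM (what is proved, stated in full; the proofs are below) =====
def Claim_equal_add_card_to_state_py : Prop := ∀ (total : Int) (soft_aces : Int) (card : Int), Dom_add_card_to_state_py total soft_aces card → Spec_add_card_to_state_py total soft_aces card (add_card_to_state_py total soft_aces card)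

-- ===== LEMMAS AND PROOFS =====
lemma pvBustLoop_closed : ∀ (n : Nat) (t s : Int), s.toNat = n →
    pvBustLoop t s =
      (if t > 21 ∧ s > 0 then (t - 10 * min s ((t - 12) / 10), s - min s ((t - 12) / 10))
       else (t, s)) := by
  intro n
  induction n with
  | zero =>
    intro t s hs
    rw [pvBustLoop]
    have : ¬ (t > 21 ∧ s > 0) := by omega
    simp [this]
  | succ m ih =>
    intro t s hs
    rw [pvBustLoop]
    by_cases h : t > 21 ∧ s > 0
    · rw [if_pos h, if_pos h, ih (t - 10) (s - 1) (by omega)]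
      by_cases h2 : t - 10 > 21 ∧ s - 1 > 0
      · rw [if_pos h2]
        have hmin : min (s - 1) ((t - 10 - 12) / 10) = min s ((t - 12) / 10) - 1 := by omega
        rw [hmin, Prod.mk.injEq]
        constructor <;> ring
      · rw [if_neg h2]
        have hmin : min s ((t - 12) / 10) = 1 := by omega
        rw [hmin, Prod.mk.injEq]
        constructor <;> omega
    · rw [if_neg h, if_neg h]

theorem add_card_to_state_py_spec : Claim_equal_add_card_to_state_py := by
  intro total soft_aces card _
  unfold Spec_add_card_to_state_py add_card_to_state_py add_card_to_state_py_alt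
  dsimp only
  rw [pvBustLoop_closed (if card = 11 then soft_aces + 1 else soft_aces).toNat _ _ rfl,
      PySem.Int.floordiv_eq_ediv_of_pos (show (0:Int) < 10 by norm_num)]
  by_cases hc : card = 11
  · simp only [hc, if_true]
    have hk : -(-(total + 11 - 21) / 10) = (total + 11 - 12) / 10 := by omega
    rw [hk]
  · simp only [hc, if_false, add_zero]
    have hk : -(-(total + card - 21) / 10) = (total + card - 12) / 10 := by omega
    rw [hk]
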